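-- pv_equiv track=rewrite | github.com/ksumini/Algorithm-Study2.0 | Programmers/숫자 타자 대회/yerin.py | solution
-- ===== SOURCE A (Python) =====
-- from collections import deque, defaultdict
--
-- def measure_distance(start, end):
--     n, m = 4, 3
--     q = deque([(start, 0)])
--     diagonal = [(1, 1), (1, -1), (-1, 1), (-1, -1)]
--     visited = set()
--     ex, ey = end
--
--     while q:
--         (x, y), dist = q.popleft()
--
--         if (x, y) == (ex, ey):
--             return dist
--
--         # 탐색하는 경로 줄이기
--         if x == ex:  # 목표 지점이 현재 위치와 같은 행
--             directions = [(0, 1), (0, -1)]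
--         elif x < ex:  # 목표 지점이 현재 위치보다 아래에 있을 때
--             directions = [(1, 0), (1, 1), (1, -1)]
--         else:  # 목표 지점이 현재 위치보다 위에 있을 때
--             directions = [(-1, 0), (-1, 1), (-1, -1)]
--
--         for dx, dy in directions:
--             nx, ny = x + dx, y + dy
--             if 0 <= nx < n and 0 <= ny < m and (nx, ny) not in visited:
--                 visited.add((nx, ny))
--                 if (dx, dy) in diagonal:
--                     q.append(((nx, ny), dist + 3))
--                 else:
--                     q.append(((nx, ny), dist + 2))
--
-- def cost(start, end):
--     sx, sy = start
--     ex, ey = end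
--
--     if start == end:  # 동일
--         return 1
--     elif abs(sx - ex) + abs(sy - ey) == 1:  # 상하좌우
--         return 2
--     elif abs(sx - ex) == 1 and abs(sy - ey) == 1:  # 대각선
--         return 3
--     else:  # 그 외
--         return measure_distance(start, end)
--
-- def solution(numbers):
--     # 숫자판 위치 설정
--     pos = {
--         '1': (0, 0), '2': (0, 1), '3': (0, 2),
--         '4': (1, 0), '5': (1, 1), '6': (1, 2),
--         '7': (2, 0), '8': (2, 1), '9': (2, 2),
--         '*': (3, 0), '0': (3, 1), '#': (3, 2)
--     }
--
--     # 모든 경로에 대한 거리값 미리 구해놓음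
--     dist = defaultdict(int)
--     for i in range(4):
--         for j in range(3):
--             for num in range(10):
--                 dist[(i, j), pos[str(num)]] = cost((i, j), pos[str(num)])
--
--     left = pos['4']
--     right = pos['6']
--     dp = {(left, right): 0}  # (왼손 좌표, 오른손 좌표, 누적 거리)
--
--     for num in numbers:
--         num_pos = pos[num]
--         new_dp = {}  # 다음 숫자로 넘어갈 때마다 dp를 갱신하기 위한 변수
--
--         for (l_pos, r_pos), cur_dist in dp.items():
--             if l_pos == r_pos:  # 왼손 오른손 겹치는 경우 제외
--                 continue
--
--             # 이미 new_dp에 있는 경우, 출발지에 따라 거리값이 다를 수 있으니 최솟값으로 갱신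
--             # 왼손이 이동
--             if (num_pos, r_pos) in new_dp and new_dp[(num_pos, r_pos)] < cur_dist + dist[(l_pos, num_pos)]:
--                 pass
--             else:
--                 new_dp[(num_pos, r_pos)] = cur_dist + dist[(l_pos, num_pos)]
--             # 오른손이 이동
--             if (l_pos, num_pos) in new_dp and new_dp[(l_pos, num_pos)] < cur_dist + dist[(r_pos, num_pos)]:
--                 pass
--             else:
--                 new_dp[(l_pos, num_pos)] = cur_dist + dist[(r_pos, num_pos)]
--
--         dp = new_dp
--     return min(dp.values())
-- ===== SOURCE B (Python) =====
-- def solution(numbers):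
--     # DP over the idle hand only: state (left_active, idle_pos) -> minimal cost;
--     # key distance is the closed form 2*max(dr,dc)+min(dr,dc) instead of a BFS table.
--     pos = {
--         '1': (0, 0), '2': (0, 1), '3': (0, 2),
--         '4': (1, 0), '5': (1, 1), '6': (1, 2),
--         '7': (2, 0), '8': (2, 1), '9': (2, 2),
--         '*': (3, 0), '0': (3, 1), '#': (3, 2)
--     }
--
--     def d(a, b):
--         if a == b:
--             return 1
--         dr = abs(a[0] - b[0])
--         dc = abs(a[1] - b[1])
--         return 2 * max(dr, dc) + min(dr, dc)
--
--     if not numbers: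
--         return 0
--
--     first = pos[numbers[0]]
--     dp = {}
--     if pos['6'] != first:
--         dp[(True, pos['6'])] = d(pos['4'], first)   # left hand typed first, right idle on 6
--     if pos['4'] != first:
--         dp[(False, pos['4'])] = d(pos['6'], first)  # right hand typed first, left idle on 4
--
--     prev = first
--     for num in numbers[1:]:
--         p = pos[num]
--         new = {}
--         for (side, o), c in dp.items():
--             if o != p:                      # active hand types again (idle must not sit on p)
--                 k, cand = (side, o), c + d(prev, p)
--                 if k not in new or cand < new[k]:
--                     new[k] = cand
--             if prev != p:                   # idle hand types (active must not sit on p)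
--                 k, cand = (not side, prev), c + d(o, p)
--                 if k not in new or cand < new[k]:
--                     new[k] = cand
--         dp = new
--         prev = p
--     return min(dp.values())
-- ===== Notes on version B (the rewrite author's own statement) =====
-- stated objective: alternative
-- what changed: Replaces the pruned-BFS distance table with a closed-form key distance 2*max(dr,dc)+min(dr,dc) and restructures the DP state from ordered hand-position pairs (up to 144 states) to (active side, idle position) (at most 24 states), forbidding collisions at transition time instead of carrying dead both-hands-on-one-key states.
-- outside the precondition, e.g. on solution(['*']): A returns 0, B returns 4
import Mathlib
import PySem

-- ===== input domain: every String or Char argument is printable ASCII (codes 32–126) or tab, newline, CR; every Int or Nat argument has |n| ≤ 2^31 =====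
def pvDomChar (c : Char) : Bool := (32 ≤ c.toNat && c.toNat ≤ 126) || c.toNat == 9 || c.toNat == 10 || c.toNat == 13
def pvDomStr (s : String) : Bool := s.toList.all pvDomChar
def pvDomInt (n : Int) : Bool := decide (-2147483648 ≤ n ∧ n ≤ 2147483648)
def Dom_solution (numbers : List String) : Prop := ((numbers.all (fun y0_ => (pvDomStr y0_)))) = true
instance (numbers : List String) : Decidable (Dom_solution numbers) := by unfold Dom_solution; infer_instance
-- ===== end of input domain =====

-- B replaces A's pruned-BFS distance table by a closed-form key distance and shrinks the
-- DP state from ordered hand-position pairs to (active side, idle position); objective: alternative.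

-- ===== PORT A =====

def pvDiagonal : List (Int × Int) := [(1, 1), (1, -1), (-1, 1), (-1, -1)]

-- the 'while q:' loop of measure_distance; the fuel argument only makes the loop total
-- (on every call solution makes, the BFS returns long before 100 iterations)
def pvBfs : Nat → List ((Int × Int) × Int) → PySem.Set (Int × Int) → Int × Int → Option Int
  | 0, _, _, _ => none
  | fuel + 1, q, visited, e =>
    match q with
    | [] => none                      -- Python: the function falls through returning None
    | ((x, y), dist) :: rest =>
      if x = e.1 ∧ y = e.2 then some dist
      else
        let directions : List (Int × Int) :=
          if x = e.1 then [(0, 1), (0, -1)]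
          else if x < e.1 then [(1, 0), (1, 1), (1, -1)]
          else [(-1, 0), (-1, 1), (-1, -1)]
        let st := directions.foldl
          (fun (acc : List ((Int × Int) × Int) × PySem.Set (Int × Int)) d =>
            let nx := x + d.1
            let ny := y + d.2
            if 0 ≤ nx ∧ nx < 4 ∧ 0 ≤ ny ∧ ny < 3 ∧ ¬ ((nx, ny) ∈ acc.2) then
              (acc.1 ++ [((nx, ny), dist + (if d ∈ pvDiagonal then 3 else 2))],
               PySem.Set.add acc.2 (nx, ny))
            else acc)
          (rest, visited)
        pvBfs fuel st.1 st.2 e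

def pvMeasureDistance (start e : Int × Int) : Option Int :=
  pvBfs 100 [(start, 0)] PySem.Set.empty e

def pvCost (s e : Int × Int) : Int :=
  if s = e then 1
  else if |s.1 - e.1| + |s.2 - e.2| = 1 then 2
  else if |s.1 - e.1| = 1 ∧ |s.2 - e.2| = 1 then 3
  else (pvMeasureDistance s e).getD 0   -- Python would return None here; unreachable on the 120 pairs cost is called on

def pvPos : PySem.Dict String (Int × Int) :=
  PySem.Dict.ofList
    [("1", (0, 0)), ("2", (0, 1)), ("3", (0, 2)),
     ("4", (1, 0)), ("5", (1, 1)), ("6", (1, 2)),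
     ("7", (2, 0)), ("8", (2, 1)), ("9", (2, 2)),
     ("*", (3, 0)), ("0", (3, 1)), ("#", (3, 2))]

-- dist = defaultdict(int) filled by the triple loop; reads use getD _ 0 (the defaultdict default)
def pvDist : PySem.Dict ((Int × Int) × (Int × Int)) Int :=
  (PySem.List.pyRange 0 4 1).foldl (fun d i =>
    (PySem.List.pyRange 0 3 1).foldl (fun d j =>
      (PySem.List.pyRange 0 10 1).foldl (fun d num =>
        let p := (pvPos.get? (PySem.Int.toStr num)).getD (0, 0)   -- pos[str(num)]: always a key
        d.insert ((i, j), p) (pvCost (i, j) p)) d) d) PySem.Dict.empty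

-- 'if k in new_dp and new_dp[k] < cand: pass else: new_dp[k] = cand'
def pvUpdA (dp : PySem.Dict ((Int × Int) × (Int × Int)) Int)
    (k : (Int × Int) × (Int × Int)) (cand : Int) : PySem.Dict ((Int × Int) × (Int × Int)) Int :=
  match dp.get? k with
  | some v => if v < cand then dp else dp.insert k cand
  | none => dp.insert k cand

-- one 'for num in numbers' iteration: rebuild new_dp from dp.items()
def pvStepA (np : Int × Int) (dp : PySem.Dict ((Int × Int) × (Int × Int)) Int) :
    PySem.Dict ((Int × Int) × (Int × Int)) Int :=
  dp.items.foldl (fun new_dp it =>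
    let l := it.1.1
    let r := it.1.2
    let cur := it.2
    if l = r then new_dp
    else
      let nd1 := pvUpdA new_dp (np, r) (cur + pvDist.getD (l, np) 0)
      pvUpdA nd1 (l, np) (cur + pvDist.getD (r, np) 0))
    PySem.Dict.empty

def solution (numbers : List String) : Int :=
  let left := (pvPos.get? "4").getD (0, 0)
  let right := (pvPos.get? "6").getD (0, 0)
  let dp0 : PySem.Dict ((Int × Int) × (Int × Int)) Int :=
    PySem.Dict.ofList [((left, right), 0)]
  let dp := numbers.foldl (fun dp num =>
    pvStepA ((pvPos.get? num).getD (0, 0)) dp) dp0   -- pos[num]: KeyError excluded by Pre_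
  (PySem.List.min? dp.values (fun v => v)).getD 0    -- min() on a never-empty dict

-- ===== PORT B =====

def pvD (a b : Int × Int) : Int :=
  if a = b then 1
  else
    let dr := |a.1 - b.1|
    let dc := |a.2 - b.2|
    2 * max dr dc + min dr dc

-- 'if k not in new or cand < new[k]: new[k] = cand'
def pvUpdB (dp : PySem.Dict (Bool × (Int × Int)) Int)
    (k : Bool × (Int × Int)) (cand : Int) : PySem.Dict (Bool × (Int × Int)) Int :=
  match dp.get? k with
  | some v => if cand < v then dp.insert k cand else dp
  | none => dp.insert k cand

-- one iteration of B's loop: state (active side, idle position) ↦ cost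
def pvStepB (prev np : Int × Int) (dp : PySem.Dict (Bool × (Int × Int)) Int) :
    PySem.Dict (Bool × (Int × Int)) Int :=
  dp.items.foldl (fun new it =>
    let side := it.1.1
    let o := it.1.2
    let c := it.2
    let n1 := if o ≠ np then pvUpdB new (side, o) (c + pvD prev np) else new
    if prev ≠ np then pvUpdB n1 (!side, prev) (c + pvD o np) else n1)
    PySem.Dict.empty

def solution_alt (numbers : List String) : Int :=
  match numbers with
  | [] => 0
  | n0 :: rest =>
    let pos := pvPos
    let first := (pos.get? n0).getD (0, 0)
    let dp0 : PySem.Dict (Bool × (Int × Int)) Int := PySem.Dict.empty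
    let dp1 := if (pos.get? "6").getD (0, 0) ≠ first then
        dp0.insert (true, (pos.get? "6").getD (0, 0)) (pvD ((pos.get? "4").getD (0, 0)) first)
      else dp0
    let dp2 := if (pos.get? "4").getD (0, 0) ≠ first then
        dp1.insert (false, (pos.get? "4").getD (0, 0)) (pvD ((pos.get? "6").getD (0, 0)) first)
      else dp1
    let st := rest.foldl (fun (st : (Int × Int) × PySem.Dict (Bool × (Int × Int)) Int) num =>
      let p := ((pos.get? num).getD (0, 0))
      (p, pvStepB st.1 p st.2)) (first, dp2)
    (PySem.List.min? st.2.values (fun v => v)).getD 0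

-- ===== PRECONDITION & SPEC =====
-- Pre_ restricts to single-digit strings, the task's natural domain (the contest types digits).
-- A raises KeyError on any other string except "*" and "#", on which A still returns a value:
-- its defaultdict distance table has no entry for those targets and silently charges 0 per move
-- (see claim.json "cites"); B charges the real key distance there.
def Pre_solution (numbers : List String) : Prop :=
  ∀ s ∈ numbers, s ∈ ["0", "1", "2", "3", "4", "5", "6", "7", "8", "9"]
instance (numbers : List String) : Decidable (Pre_solution numbers) := by
  unfold Pre_solution; infer_instance

def pvWitness_solution : List String := ["5", "9", "0", "5"]

def Spec_solution (numbers : List String) (out : Int) : Prop := out = solution_alt numbers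
instance (numbers : List String) (out : Int) : Decidable (Spec_solution numbers out) := by
  unfold Spec_solution; infer_instance

-- ===== CLAIM (what is proved, stated in full; the proofs are below) =====
def Claim_equal_solution : Prop := ∀ (numbers : List String), Dom_solution numbers → Pre_solution numbers → Spec_solution numbers (solution numbers)

-- ===== LEMMAS AND PROOFS =====
-- ===== LEMMAS AND PROOFS =====

-- proof-layer constants
def pvCells : List (Int × Int) :=
  [(0,0),(0,1),(0,2),(1,0),(1,1),(1,2),(2,0),(2,1),(2,2),(3,0),(3,1),(3,2)]
def pvDigits : List (Int × Int) :=
  [(3,1),(0,0),(0,1),(0,2),(1,0),(1,1),(1,2),(2,0),(2,1),(2,2)]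
def pvDigitKeys : List String := ["0","1","2","3","4","5","6","7","8","9"]
def pvDistLit : PySem.Dict ((Int × Int) × (Int × Int)) Int :=
  PySem.Dict.ofList [(((0, 0), (3, 1)), 7), (((0, 0), (0, 0)), 1), (((0, 0), (0, 1)), 2), (((0, 0), (0, 2)), 4), (((0, 0), (1, 0)), 2), (((0, 0), (1, 1)), 3), (((0, 0), (1, 2)), 5), (((0, 0), (2, 0)), 4), (((0, 0), (2, 1)), 5), (((0, 0), (2, 2)), 6), (((0, 1), (3, 1)), 6), (((0, 1), (0, 0)), 2), (((0, 1), (0, 1)), 1), (((0, 1), (0, 2)), 2), (((0, 1), (1, 0)), 3), (((0, 1), (1, 1)), 2), (((0, 1), (1, 2)), 3), (((0, 1), (2, 0)), 5), (((0, 1), (2, 1)), 4), (((0, 1), (2, 2)), 5), (((0, 2), (3, 1)), 7), (((0, 2), (0, 0)), 4), (((0, 2), (0, 1)), 2), (((0, 2), (0, 2)), 1), (((0, 2), (1, 0)), 5), (((0, 2), (1, 1)), 3), (((0, 2), (1, 2)), 2), (((0, 2), (2, 0)), 6), (((0, 2), (2, 1)), 5), (((0, 2), (2, 2)), 4), (((1,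 0), (3, 1)), 5), (((1, 0), (0, 0)), 2), (((1, 0), (0, 1)), 3), (((1, 0), (0, 2)), 5), (((1, 0), (1, 0)), 1), (((1, 0), (1, 1)), 2), (((1, 0), (1, 2)), 4), (((1, 0), (2, 0)), 2), (((1, 0), (2, 1)), 3), (((1, 0), (2, 2)), 5), (((1, 1), (3, 1)), 4), (((1, 1), (0, 0)), 3), (((1, 1), (0, 1)), 2), (((1, 1), (0, 2)), 3), (((1, 1), (1, 0)), 2), (((1, 1), (1, 1)), 1), (((1, 1), (1, 2)), 2), (((1, 1), (2, 0)), 3), (((1, 1), (2, 1)), 2), (((1, 1), (2, 2)), 3), (((1, 2), (3, 1)), 5), (((1, 2), (0, 0)), 5), (((1, 2), (0, 1)), 3), (((1, 2), (0, 2)), 2), (((1, 2), (1, 0)), 4), (((1, 2), (1, 1)), 2), (((1, 2), (1, 2)), 1), (((1, 2), (2, 0)), 5), (((1, 2), (2, 1)), 3), (((1, 2), (2, 2)), 2), (((2, 0), (3, 1)), 3), (((2, 0), (0, 0)), 4), (((2, 0), (0, 1)), 5), (((2, 0), (0, 2)), 6), (((2, 0), (1, 0)), 2), (((2, 0), (1,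 1)), 3), (((2, 0), (1, 2)), 5), (((2, 0), (2, 0)), 1), (((2, 0), (2, 1)), 2), (((2, 0), (2, 2)), 4), (((2, 1), (3, 1)), 2), (((2, 1), (0, 0)), 5), (((2, 1), (0, 1)), 4), (((2, 1), (0, 2)), 5), (((2, 1), (1, 0)), 3), (((2, 1), (1, 1)), 2), (((2, 1), (1, 2)), 3), (((2, 1), (2, 0)), 2), (((2, 1), (2, 1)), 1), (((2, 1), (2, 2)), 2), (((2, 2), (3, 1)), 3), (((2, 2), (0, 0)), 6), (((2, 2), (0, 1)), 5), (((2, 2), (0, 2)), 4), (((2, 2), (1, 0)), 5), (((2, 2), (1, 1)), 3), (((2, 2), (1, 2)), 2), (((2, 2), (2, 0)), 4), (((2, 2), (2, 1)), 2), (((2, 2), (2, 2)), 1), (((3, 0), (3, 1)), 2), (((3, 0), (0, 0)), 6), (((3, 0), (0, 1)), 7), (((3, 0), (0, 2)), 8), (((3, 0), (1, 0)), 4), (((3, 0), (1, 1)), 5), (((3, 0), (1, 2)), 6), (((3, 0), (2, 0)), 2), (((3, 0), (2, 1)), 3), (((3, 0), (2, 2)), 5), (((3, 1), (3, 1)), 1),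 (((3, 1), (0, 0)), 7), (((3, 1), (0, 1)), 6), (((3, 1), (0, 2)), 7), (((3, 1), (1, 0)), 5), (((3, 1), (1, 1)), 4), (((3, 1), (1, 2)), 5), (((3, 1), (2, 0)), 3), (((3, 1), (2, 1)), 2), (((3, 1), (2, 2)), 3), (((3, 2), (3, 1)), 2), (((3, 2), (0, 0)), 8), (((3, 2), (0, 1)), 7), (((3, 2), (0, 2)), 6), (((3, 2), (1, 0)), 6), (((3, 2), (1, 1)), 5), (((3, 2), (1, 2)), 4), (((3, 2), (2, 0)), 5), (((3, 2), (2, 1)), 3), (((3, 2), (2, 2)), 2)]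

def pvDP0A : PySem.Dict ((Int × Int) × (Int × Int)) Int :=
  PySem.Dict.ofList [(((1,0),(1,2)), 0)]

def pvSeedB (np : Int × Int) : PySem.Dict (Bool × (Int × Int)) Int :=
  let dp1 := if ((1:Int),(2:Int)) ≠ np then
      (PySem.Dict.empty : PySem.Dict (Bool × (Int × Int)) Int).insert (true, (1,2)) (pvD (1,0) np)
    else PySem.Dict.empty
  if ((1:Int),(0:Int)) ≠ np then dp1.insert (false, (1,0)) (pvD (1,2) np) else dp1

def pvOMin : Option Int → Int → Int
  | none, c => c
  | some v, c => min v c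

def pvBlend (o : Option Int) (cs : List Int) : Option Int :=
  cs.foldl (fun a c => some (pvOMin a c)) o

def pvItemCandsA (np : Int × Int) (k : (Int × Int) × (Int × Int))
    (it : ((Int × Int) × (Int × Int)) × Int) : List Int :=
  if it.1.1 = it.1.2 then []
  else (if k = (np, it.1.2) then [it.2 + pvDist.getD (it.1.1, np) 0] else []) ++
       (if k = (it.1.1, np) then [it.2 + pvDist.getD (it.1.2, np) 0] else [])

def pvCandsA (np : Int × Int) (k : (Int × Int) × (Int × Int))
    (items : List (((Int × Int) × (Int × Int)) × Int)) : List Int :=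
  items.flatMap (pvItemCandsA np k)

def pvItemCandsB (prev np : Int × Int) (k : Bool × (Int × Int))
    (it : (Bool × (Int × Int)) × Int) : List Int :=
  (if it.1.2 ≠ np ∧ k = it.1 then [it.2 + pvD prev np] else []) ++
  (if prev ≠ np ∧ k = (!it.1.1, prev) then [it.2 + pvD it.1.2 np] else [])

def pvCandsB (prev np : Int × Int) (k : Bool × (Int × Int))
    (items : List ((Bool × (Int × Int)) × Int)) : List Int :=
  items.flatMap (pvItemCandsB prev np k)

abbrev pvInv (p : Int × Int) (dpA : PySem.Dict ((Int × Int) × (Int × Int)) Int)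
    (dpB : PySem.Dict (Bool × (Int × Int)) Int) : Prop :=
  dpA.keys.Nodup ∧ dpB.keys.Nodup ∧
  (∀ o ∈ pvCells, o ≠ p → dpA.get? (p, o) = dpB.get? (true, o) ∧ dpA.get? (o, p) = dpB.get? (false, o)) ∧
  (∀ it ∈ dpA.items, (it.1.1 = p ∨ it.1.2 = p) ∧ it.1.1 ∈ pvCells ∧ it.1.2 ∈ pvCells) ∧
  (∀ it ∈ dpB.items, it.1.2 ∈ pvCells ∧ it.1.2 ≠ p) ∧
  dpB.items ≠ [] ∧
  (∀ it ∈ dpA.items, it.1 = (p, p) → ∃ it' ∈ dpB.items, it'.2 ≤ it.2)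

-- update lemmas
theorem pvUpdA_get? (dp : PySem.Dict ((Int × Int) × (Int × Int)) Int) (k : (Int × Int) × (Int × Int))
    (c : Int) (k' : (Int × Int) × (Int × Int)) :
    (pvUpdA dp k c).get? k' = if k' = k then some (pvOMin (dp.get? k) c) else dp.get? k' := by
  rcases h : dp.get? k with _ | v
  · simp only [pvUpdA, h, PySem.Dict.get?_insert, pvOMin]
  · simp only [pvUpdA, h, pvOMin]
    by_cases hv : v < c
    · rw [if_pos hv]
      by_cases hk : k' = k
      · rw [if_pos hk, hk, h, min_eq_left hv.le]
      · rw [if_neg hk]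
    · rw [if_neg hv, PySem.Dict.get?_insert]
      by_cases hk : k' = k
      · rw [if_pos hk, if_pos hk, min_eq_right (not_lt.mp hv)]
      · rw [if_neg hk, if_neg hk]

theorem pvUpdB_get? (dp : PySem.Dict (Bool × (Int × Int)) Int) (k : Bool × (Int × Int))
    (c : Int) (k' : Bool × (Int × Int)) :
    (pvUpdB dp k c).get? k' = if k' = k then some (pvOMin (dp.get? k) c) else dp.get? k' := by
  rcases h : dp.get? k with _ | v
  · simp only [pvUpdB, h, PySem.Dict.get?_insert, pvOMin]
  · simp only [pvUpdB, h, pvOMin]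
    by_cases hv : c < v
    · rw [if_pos hv, PySem.Dict.get?_insert]
      by_cases hk : k' = k
      · rw [if_pos hk, if_pos hk, min_eq_right hv.le]
      · rw [if_neg hk, if_neg hk]
    · rw [if_neg hv]
      by_cases hk : k' = k
      · rw [if_pos hk, hk, h, min_eq_left (not_lt.mp hv)]
      · rw [if_neg hk]

theorem pvUpdA_nodup (dp : PySem.Dict ((Int × Int) × (Int × Int)) Int) (k : (Int × Int) × (Int × Int))
    (c : Int) (h : dp.keys.Nodup) : (pvUpdA dp k c).keys.Nodup := by
  rcases hg : dp.get? k with _ | v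
  · simp only [pvUpdA, hg]; exact PySem.Dict.nodup_keys_insert _ _ _ h
  · simp only [pvUpdA, hg]
    split_ifs
    · exact h
    · exact PySem.Dict.nodup_keys_insert _ _ _ h

theorem pvUpdB_nodup (dp : PySem.Dict (Bool × (Int × Int)) Int) (k : Bool × (Int × Int))
    (c : Int) (h : dp.keys.Nodup) : (pvUpdB dp k c).keys.Nodup := by
  rcases hg : dp.get? k with _ | v
  · simp only [pvUpdB, hg]; exact PySem.Dict.nodup_keys_insert _ _ _ h
  · simp only [pvUpdB, hg]
    split_ifs
    · exact PySem.Dict.nodup_keys_insert _ _ _ h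
    · exact h

-- blend basics
theorem pvBlend_append (o : Option Int) (xs ys : List Int) :
    pvBlend o (xs ++ ys) = pvBlend (pvBlend o xs) ys := by
  unfold pvBlend; exact List.foldl_append

theorem pvBlend_some (cs : List Int) : ∀ a, pvBlend (some a) cs = some (cs.foldl min a) := by
  induction cs with
  | nil => intro a; rfl
  | cons c cs ih => intro a; simpa [pvBlend, pvOMin, List.foldl_cons] using ih (min a c)

theorem pvBlend_none_cons (c : Int) (cs : List Int) :
    pvBlend none (c :: cs) = some (cs.foldl min c) := by
  simpa [pvBlend, pvOMin, List.foldl_cons] using pvBlend_some cs c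

theorem pvFoldl_min_le_init (cs : List Int) : ∀ a : Int, cs.foldl min a ≤ a := by
  induction cs with
  | nil => intro a; simp
  | cons c cs ih => intro a; calc (c :: cs).foldl min a = cs.foldl min (min a c) := rfl
                     _ ≤ min a c := ih _
                     _ ≤ a := min_le_left _ _

theorem pvFoldl_min_le_mem (cs : List Int) : ∀ (a x : Int), x ∈ cs → cs.foldl min a ≤ x := by
  induction cs with
  | nil => intro a x hx; cases hx
  | cons c cs ih =>
    intro a x hx
    rcases List.mem_cons.mp hx with h | h
    · subst h
      calc (x :: cs).foldl min a = cs.foldl min (min a x) := rfl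
        _ ≤ min a x := pvFoldl_min_le_init _ _
        _ ≤ x := min_le_right _ _
    · exact ih _ x h

theorem pvFoldl_min_cases (cs : List Int) : ∀ a : Int, cs.foldl min a = a ∨ cs.foldl min a ∈ cs := by
  induction cs with
  | nil => intro a; left; rfl
  | cons c cs ih =>
    intro a
    have hstep : (c :: cs).foldl min a = cs.foldl min (min a c) := rfl
    rcases ih (min a c) with h | h
    · rcases le_total a c with hac | hac
      · left; rw [hstep, h, min_eq_left hac]
      · right; exact List.mem_cons.mpr (Or.inl (by rw [hstep, h, min_eq_right hac]))
    · right; exact List.mem_cons.mpr (Or.inr (by rw [hstep]; exact h))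

theorem pvBlend_none_eq_none_iff (cs : List Int) : pvBlend none cs = none ↔ cs = [] := by
  cases cs with
  | nil => simp [pvBlend]
  | cons c cs => simp [pvBlend_none_cons]

theorem pvBlend_mem {cs : List Int} {v : Int} (h : pvBlend none cs = some v) : v ∈ cs := by
  cases cs with
  | nil => simp [pvBlend] at h
  | cons c cs =>
    rw [pvBlend_none_cons] at h
    have hv := Option.some_inj.mp h
    rw [← hv]
    rcases pvFoldl_min_cases cs c with h' | h'
    · rw [h']; exact List.mem_cons_self ..
    · exact List.mem_cons_of_mem _ h'

theorem pvBlend_le {cs : List Int} {v : Int} (h : pvBlend none cs = some v) :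
    ∀ x ∈ cs, v ≤ x := by
  cases cs with
  | nil => simp [pvBlend] at h
  | cons c cs =>
    rw [pvBlend_none_cons] at h
    intro x hx
    rw [← Option.some_inj.mp h]
    rcases List.mem_cons.mp hx with h' | h'
    · subst h'; exact pvFoldl_min_le_init _ _
    · exact pvFoldl_min_le_mem _ _ _ h'

theorem pvBlend_congr {xs ys : List Int}
    (h1 : ∀ x ∈ xs, ∃ y ∈ ys, y ≤ x) (h2 : ∀ y ∈ ys, ∃ x ∈ xs, x ≤ y) :
    pvBlend none xs = pvBlend none ys := by
  rcases hx : pvBlend none xs with _ | v1 <;> rcases hy : pvBlend none ys with _ | v2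
  · rfl
  · have : ys = [] := by
      have hxe : xs = [] := (pvBlend_none_eq_none_iff xs).mp hx
      subst hxe
      cases ys with
      | nil => rfl
      | cons y ys =>
        rcases h2 y (by simp) with ⟨x, hxm, _⟩
        cases hxm
    rw [this] at hy; simp [pvBlend] at hy
  · have : xs = [] := by
      have hye : ys = [] := (pvBlend_none_eq_none_iff ys).mp hy
      subst hye
      cases xs with
      | nil => rfl
      | cons x xs =>
        rcases h1 x (by simp) with ⟨y, hym, _⟩
        cases hym
    rw [this] at hx; simp [pvBlend] at hx
  · congr 1
    have hv1 : v1 ∈ xs := pvBlend_mem hx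
    have hv2 : v2 ∈ ys := pvBlend_mem hy
    rcases h1 v1 hv1 with ⟨y, hym, hyl⟩
    rcases h2 v2 hv2 with ⟨x, hxm, hxl⟩
    have := pvBlend_le hx x hxm
    have := pvBlend_le hy y hym
    omega

theorem pvMin?_eq_blend (xs : List Int) :
    PySem.List.min? xs (fun v => v) = pvBlend none xs := by
  cases xs with
  | nil => simp [PySem.List.min?, pvBlend]
  | cons x xs => rw [PySem.List.min?_id_cons, pvBlend_none_cons]

-- one body application of A's loop
theorem pvBodyA_get? (np : Int × Int) (acc : PySem.Dict ((Int × Int) × (Int × Int)) Int)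
    (it : ((Int × Int) × (Int × Int)) × Int) (k : (Int × Int) × (Int × Int)) :
    ((fun new_dp it =>
        let l := it.1.1
        let r := it.1.2
        let cur := it.2
        if l = r then new_dp
        else
          let nd1 := pvUpdA new_dp (np, r) (cur + pvDist.getD (l, np) 0)
          pvUpdA nd1 (l, np) (cur + pvDist.getD (r, np) 0)) acc it).get? k
      = pvBlend (acc.get? k) (pvItemCandsA np k it) := by
  obtain ⟨⟨l, r⟩, c⟩ := it
  unfold pvItemCandsA
  dsimp only
  by_cases h : l = r
  · rw [if_pos h, if_pos h]; rfl
  · rw [if_neg h, if_neg h]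
    simp only [pvUpdA_get?]
    by_cases h2 : k = (l, np) <;> by_cases h1 : k = (np, r)
    · subst h2
      obtain ⟨ha, hb⟩ := Prod.mk.injEq .. ▸ h1
      subst ha
      rw [← hb]
      simp [pvBlend]
    · subst h2
      simp [pvBlend, h1]
    · subst h1
      simp [pvBlend, h2]
    · simp [pvBlend, h1, h2]
theorem pvStepA_fold_get? (np : Int × Int) (items : List (((Int × Int) × (Int × Int)) × Int)) :
    ∀ (acc : PySem.Dict ((Int × Int) × (Int × Int)) Int) (k : (Int × Int) × (Int × Int)),
    ((items.foldl (fun new_dp it =>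
        let l := it.1.1
        let r := it.1.2
        let cur := it.2
        if l = r then new_dp
        else
          let nd1 := pvUpdA new_dp (np, r) (cur + pvDist.getD (l, np) 0)
          pvUpdA nd1 (l, np) (cur + pvDist.getD (r, np) 0)) acc).get? k)
      = pvBlend (acc.get? k) (pvCandsA np k items) := by
  induction items with
  | nil => intro acc k; simp [pvCandsA, pvBlend]
  | cons it items ih =>
    intro acc k
    rw [List.foldl_cons]
    rw [ih]
    rw [pvBodyA_get?]
    rw [show pvCandsA np k (it :: items) = pvItemCandsA np k it ++ pvCandsA np k items from by
      simp [pvCandsA]]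
    rw [pvBlend_append]

theorem pvStepA_get? (np : Int × Int) (dp : PySem.Dict ((Int × Int) × (Int × Int)) Int)
    (k : (Int × Int) × (Int × Int)) :
    (pvStepA np dp).get? k = pvBlend none (pvCandsA np k dp.items) := by
  unfold pvStepA
  rw [pvStepA_fold_get?]
  rfl

theorem pvBodyB_get? (prev np : Int × Int) (acc : PySem.Dict (Bool × (Int × Int)) Int)
    (it : (Bool × (Int × Int)) × Int) (k : Bool × (Int × Int)) :
    ((fun new it =>
        let side := it.1.1
        let o := it.1.2
        let c := it.2
        let n1 := if o ≠ np then pvUpdB new (side, o) (c + pvD prev np) else new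
        if prev ≠ np then pvUpdB n1 (!side, prev) (c + pvD o np) else n1) acc it).get? k
      = pvBlend (acc.get? k) (pvItemCandsB prev np k it) := by
  obtain ⟨⟨s, o⟩, c⟩ := it
  unfold pvItemCandsB
  dsimp only
  by_cases g1 : o ≠ np <;> by_cases g2 : prev ≠ np
  · -- both guards hold
    rw [if_pos g1, if_pos g2]
    simp only [pvUpdB_get?]
    by_cases h2 : k = (!s, prev) <;> by_cases h1 : k = (s, o)
    · exfalso
      have hps : (!s, prev) = ((s, o) : Bool × (Int × Int)) := h2.symm.trans h1
      have hb : (!s) = s := congrArg Prod.fst hps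
      exact Bool.not_ne_self s hb
    · subst h2
      simp [pvBlend, g1, g2, h1]
    · subst h1
      simp [pvBlend, g1, g2, h2]
    · simp [pvBlend, g1, g2, h1, h2]
  · -- only the active-move guard holds
    rw [if_pos g1, if_neg g2]
    simp only [pvUpdB_get?]
    by_cases h1 : k = (s, o)
    · subst h1; simp [pvBlend, g1, g2]
    · simp [pvBlend, g1, g2, h1]
  · -- only the idle-move guard holds
    rw [if_neg g1, if_pos g2]
    simp only [pvUpdB_get?]
    by_cases h2 : k = (!s, prev)
    · subst h2; simp [pvBlend, g1, g2]
    · simp [pvBlend, g1, g2, h2]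
  · rw [if_neg g1, if_neg g2]
    simp [pvBlend, g1, g2]

theorem pvStepB_fold_get? (prev np : Int × Int) (items : List ((Bool × (Int × Int)) × Int)) :
    ∀ (acc : PySem.Dict (Bool × (Int × Int)) Int) (k : Bool × (Int × Int)),
    ((items.foldl (fun new it =>
        let side := it.1.1
        let o := it.1.2
        let c := it.2
        let n1 := if o ≠ np then pvUpdB new (side, o) (c + pvD prev np) else new
        if prev ≠ np then pvUpdB n1 (!side, prev) (c + pvD o np) else n1) acc).get? k)
      = pvBlend (acc.get? k) (pvCandsB prev np k items) := by
  induction items with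
  | nil => intro acc k; simp [pvCandsB, pvBlend]
  | cons it items ih =>
    intro acc k
    rw [List.foldl_cons, ih, pvBodyB_get?]
    rw [show pvCandsB prev np k (it :: items) = pvItemCandsB prev np k it ++ pvCandsB prev np k items from by
      simp [pvCandsB]]
    rw [pvBlend_append]

theorem pvStepB_get? (prev np : Int × Int) (dp : PySem.Dict (Bool × (Int × Int)) Int)
    (k : Bool × (Int × Int)) :
    (pvStepB prev np dp).get? k = pvBlend none (pvCandsB prev np k dp.items) := by
  unfold pvStepB
  rw [pvStepB_fold_get?]
  rfl

theorem pvStepA_nodup (np : Int × Int) (dp : PySem.Dict ((Int × Int) × (Int × Int)) Int) :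
    (pvStepA np dp).keys.Nodup := by
  unfold pvStepA
  generalize dp.items = items
  have : ∀ (acc : PySem.Dict ((Int × Int) × (Int × Int)) Int), acc.keys.Nodup →
      (items.foldl (fun new_dp it =>
        let l := it.1.1
        let r := it.1.2
        let cur := it.2
        if l = r then new_dp
        else
          let nd1 := pvUpdA new_dp (np, r) (cur + pvDist.getD (l, np) 0)
          pvUpdA nd1 (l, np) (cur + pvDist.getD (r, np) 0)) acc).keys.Nodup := by
    induction items with
    | nil => intro acc h; exact h
    | cons it items ih =>
      intro acc h
      rw [List.foldl_cons]
      apply ih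
      simp only []
      split_ifs
      · exact h
      · exact pvUpdA_nodup _ _ _ (pvUpdA_nodup _ _ _ h)
  exact this _ PySem.Dict.nodup_keys_empty

theorem pvStepB_nodup (prev np : Int × Int) (dp : PySem.Dict (Bool × (Int × Int)) Int) :
    (pvStepB prev np dp).keys.Nodup := by
  unfold pvStepB
  generalize dp.items = items
  have : ∀ (acc : PySem.Dict (Bool × (Int × Int)) Int), acc.keys.Nodup →
      (items.foldl (fun new it =>
        let side := it.1.1
        let o := it.1.2
        let c := it.2
        let n1 := if o ≠ np then pvUpdB new (side, o) (c + pvD prev np) else new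
        if prev ≠ np then pvUpdB n1 (!side, prev) (c + pvD o np) else n1) acc).keys.Nodup := by
    induction items with
    | nil => intro acc h; exact h
    | cons it items ih =>
      intro acc h
      rw [List.foldl_cons]
      apply ih
      simp only []
      split_ifs
      all_goals first
        | exact h
        | exact pvUpdB_nodup _ _ _ h
        | exact pvUpdB_nodup _ _ _ (pvUpdB_nodup _ _ _ h)
  exact this _ PySem.Dict.nodup_keys_empty

-- candidate membership characterizations
theorem pvMem_ite_singleton {c : Prop} [Decidable c] {a x : Int} :
    x ∈ (if c then [a] else ([] : List Int)) ↔ c ∧ x = a := by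
  split_ifs with h <;> simp [h]

theorem pvMem_itemCandsA (np : Int × Int) (k : (Int × Int) × (Int × Int))
    (it : ((Int × Int) × (Int × Int)) × Int) (x : Int) :
    x ∈ pvItemCandsA np k it ↔
      it.1.1 ≠ it.1.2 ∧
        ((k = (np, it.1.2) ∧ x = it.2 + pvDist.getD (it.1.1, np) 0) ∨
         (k = (it.1.1, np) ∧ x = it.2 + pvDist.getD (it.1.2, np) 0)) := by
  unfold pvItemCandsA
  by_cases h : it.1.1 = it.1.2
  · rw [if_pos h]; simp [h]
  · rw [if_neg h, List.mem_append, pvMem_ite_singleton, pvMem_ite_singleton]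
    simp [h]

theorem pvMem_candsA (np : Int × Int) (k : (Int × Int) × (Int × Int))
    (items : List (((Int × Int) × (Int × Int)) × Int)) (x : Int) :
    x ∈ pvCandsA np k items ↔
      ∃ it ∈ items, it.1.1 ≠ it.1.2 ∧
        ((k = (np, it.1.2) ∧ x = it.2 + pvDist.getD (it.1.1, np) 0) ∨
         (k = (it.1.1, np) ∧ x = it.2 + pvDist.getD (it.1.2, np) 0)) := by
  unfold pvCandsA
  rw [List.mem_flatMap]
  constructor
  · rintro ⟨it, hit, hx⟩
    exact ⟨it, hit, (pvMem_itemCandsA np k it x).mp hx⟩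
  · rintro ⟨it, hit, hx⟩
    exact ⟨it, hit, (pvMem_itemCandsA np k it x).mpr hx⟩

theorem pvMem_itemCandsB (prev np : Int × Int) (k : Bool × (Int × Int))
    (it : (Bool × (Int × Int)) × Int) (x : Int) :
    x ∈ pvItemCandsB prev np k it ↔
      ((it.1.2 ≠ np ∧ k = it.1 ∧ x = it.2 + pvD prev np) ∨
       (prev ≠ np ∧ k = (!it.1.1, prev) ∧ x = it.2 + pvD it.1.2 np)) := by
  unfold pvItemCandsB
  rw [List.mem_append, pvMem_ite_singleton, pvMem_ite_singleton]
  simp [and_assoc]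

theorem pvMem_candsB (prev np : Int × Int) (k : Bool × (Int × Int))
    (items : List ((Bool × (Int × Int)) × Int)) (x : Int) :
    x ∈ pvCandsB prev np k items ↔
      ∃ it ∈ items,
        ((it.1.2 ≠ np ∧ k = it.1 ∧ x = it.2 + pvD prev np) ∨
         (prev ≠ np ∧ k = (!it.1.1, prev) ∧ x = it.2 + pvD it.1.2 np)) := by
  unfold pvCandsB
  rw [List.mem_flatMap]
  constructor
  · rintro ⟨it, hit, hx⟩
    exact ⟨it, hit, (pvMem_itemCandsB prev np k it x).mp hx⟩
  · rintro ⟨it, hit, hx⟩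
    exact ⟨it, hit, (pvMem_itemCandsB prev np k it x).mpr hx⟩

set_option maxRecDepth 100000 in
theorem pvDist_eq_lit : pvDist = pvDistLit := by decide

set_option maxRecDepth 100000 in
theorem pvDistLit_getD : ∀ a ∈ pvCells, ∀ b ∈ pvDigits, pvDistLit.getD (a, b) 0 = pvD a b := by
  decide

theorem pvDist_getD {a b : Int × Int} (ha : a ∈ pvCells) (hb : b ∈ pvDigits) :
    pvDist.getD (a, b) 0 = pvD a b := by
  rw [pvDist_eq_lit]
  exact pvDistLit_getD a ha b hb

theorem pvD_ge_one (a b : Int × Int) : 1 ≤ pvD a b := by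
  unfold pvD
  split_ifs with h
  · omega
  · show 1 ≤ 2 * max |a.1 - b.1| |a.2 - b.2| + min |a.1 - b.1| |a.2 - b.2|
    have ha1 : 0 ≤ |a.1 - b.1| := abs_nonneg _
    have ha2 : 0 ≤ |a.2 - b.2| := abs_nonneg _
    have key : 1 ≤ |a.1 - b.1| ∨ 1 ≤ |a.2 - b.2| := by
      rcases eq_or_lt_of_le ha1 with he1 | hl1
      · right
        rcases eq_or_lt_of_le ha2 with he2 | hl2
        · exfalso
          refine h (Prod.ext_iff.mpr ⟨?_, ?_⟩)
          · have := abs_eq_zero.mp he1.symm; omega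
          · have := abs_eq_zero.mp he2.symm; omega
        · omega
      · left; omega
    rcases max_choice |a.1 - b.1| |a.2 - b.2| with hm | hm <;>
      rcases min_choice |a.1 - b.1| |a.2 - b.2| with hn | hn <;>
      rw [hm, hn] <;> omega

theorem pvDigits_sub_cells : ∀ x ∈ pvDigits, x ∈ pvCells := by decide

set_option maxRecDepth 100000 in
theorem pvPosLook_digits : ∀ s ∈ pvDigitKeys, ((pvPos.get? s).getD (0, 0)) ∈ pvDigits := by decide

set_option maxRecDepth 100000 in
theorem pvInv_base : ∀ np ∈ pvDigits, pvInv np (pvStepA np pvDP0A) (pvSeedB np) := by decide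

theorem pvD_self (a : Int × Int) : pvD a a = 1 := by simp [pvD]

theorem pvInv_step (p np : Int × Int) (hp : p ∈ pvCells) (hnp : np ∈ pvDigits)
    (dpA : PySem.Dict ((Int × Int) × (Int × Int)) Int) (dpB : PySem.Dict (Bool × (Int × Int)) Int)
    (h : pvInv p dpA dpB) : pvInv np (pvStepA np dpA) (pvStepB p np dpB) := by
  obtain ⟨hndA, hndB, hEq, hShA, hShB, hNE, hOv⟩ := h
  have hnpC : np ∈ pvCells := pvDigits_sub_cells np hnp
  have memA : ∀ (k : (Int × Int) × (Int × Int)) (v : Int),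
      dpA.get? k = some v ↔ (k, v) ∈ dpA.items :=
    fun k v => PySem.Dict.get?_eq_some_iff_mem_items dpA k v hndA
  have memB : ∀ (k : Bool × (Int × Int)) (v : Int),
      dpB.get? k = some v ↔ (k, v) ∈ dpB.items :=
    fun k v => PySem.Dict.get?_eq_some_iff_mem_items dpB k v hndB
  have hitA : ∀ it ∈ dpA.items, dpA.get? it.1 = some it.2 := by
    intro it hit
    exact (memA it.1 it.2).mpr (by rwa [Prod.mk.eta])
  have hitB : ∀ it ∈ dpB.items, dpB.get? it.1 = some it.2 := by
    intro it hit
    exact (memB it.1 it.2).mpr (by rwa [Prod.mk.eta])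
  -- central correspondence between the candidate lists
  have main : ∀ o ∈ pvCells, o ≠ np →
      pvBlend none (pvCandsA np (np, o) dpA.items) = pvBlend none (pvCandsB p np (true, o) dpB.items) ∧
      pvBlend none (pvCandsA np (o, np) dpA.items) = pvBlend none (pvCandsB p np (false, o) dpB.items) := by
    intro o ho honp
    constructor
    · apply pvBlend_congr
      · intro x hx
        rw [pvMem_candsA] at hx
        obtain ⟨it, hit, hlr, hcase⟩ := hx
        obtain ⟨hsh, hlC, hrC⟩ := hShA _ hit
        rcases hcase with ⟨hk, hxv⟩ | ⟨hk, hxv⟩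
        · -- the left hand moved onto np; key (np, it.1.2), so it.1.2 = o
          have hor : o = it.1.2 := (Prod.ext_iff.mp hk).2
          by_cases hop : o = p
          · -- o = p : the A-item (it.1.1, p) matches the B-state (false, it.1.1)
            have h2p : it.1.2 = p := hor.symm.trans hop
            have hl2 : it.1.1 ≠ p := fun hc => hlr (hc.trans h2p.symm)
            have hkey : it.1 = (it.1.1, p) := Prod.ext_iff.mpr ⟨rfl, h2p⟩
            have hgB : dpB.get? (false, it.1.1) = some it.2 := by
              rw [← (hEq it.1.1 hlC hl2).2, ← hkey]
              exact hitA it hit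
            refine ⟨it.2 + pvD it.1.1 np, ?_, ?_⟩
            · rw [pvMem_candsB]
              refine ⟨((false, it.1.1), it.2), (memB _ _).mp hgB, Or.inr ⟨?_, ?_, rfl⟩⟩
              · rw [← hop]; exact honp
              · rw [hop]; rfl
            · rw [hxv, pvDist_getD hlC hnp]
          · -- o ≠ p : the first component must be p
            have hlp : it.1.1 = p := by
              rcases hsh with h1 | h1
              · exact h1
              · exact absurd (hor.trans h1) hop
            have hkey : it.1 = (p, o) := Prod.ext_iff.mpr ⟨hlp, hor.symm⟩
            have hgB : dpB.get? (true, o) = some it.2 := by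
              rw [← (hEq o ho hop).1, ← hkey]
              exact hitA it hit
            refine ⟨it.2 + pvD p np, ?_, ?_⟩
            · rw [pvMem_candsB]
              exact ⟨((true, o), it.2), (memB _ _).mp hgB, Or.inl ⟨honp, rfl, rfl⟩⟩
            · rw [hxv, hlp, pvDist_getD hp hnp]
        · -- key (it.1.1, np) = (np, o) forces o = np, impossible
          exact absurd (show o = np from (Prod.ext_iff.mp hk).2) honp
      · intro y hy
        rw [pvMem_candsB] at hy
        obtain ⟨it, hit, hcase⟩ := hy
        obtain ⟨ho'C, ho'p⟩ := hShB _ hit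
        rcases hcase with ⟨ho'np, hk, hyv⟩ | ⟨hpnp, hk, hyv⟩
        · -- active move: it.1 = (true, o)
          have hkey : it.1 = (true, o) := hk.symm
          have hop : o ≠ p := by rw [← (show it.1.2 = o from congrArg Prod.snd hkey)]; exact ho'p
          have hgA : dpA.get? (p, o) = some it.2 := by
            rw [(hEq o ho hop).1, ← hkey]
            exact hitB it hit
          refine ⟨it.2 + pvDist.getD (p, np) 0, ?_, ?_⟩
          · rw [pvMem_candsA]
            exact ⟨((p, o), it.2), (memA _ _).mp hgA, fun hc => hop (show p = o from hc).symm,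
              Or.inl ⟨rfl, rfl⟩⟩
          · rw [hyv, pvDist_getD hp hnp]
        · -- idle move: key (true, o) = (!it.1.1, p), so o = p and it.1.1 = false
          have hop : o = p := (Prod.ext_iff.mp hk).2
          have hs : it.1.1 = false := by
            have hb := (Prod.ext_iff.mp hk).1
            cases hbc : it.1.1
            · rfl
            · rw [hbc] at hb; simp at hb
          have hkey : it.1 = (false, it.1.2) := Prod.ext_iff.mpr ⟨hs, rfl⟩
          have hgA : dpA.get? (it.1.2, p) = some it.2 := by
            rw [(hEq it.1.2 ho'C ho'p).2, ← hkey]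
            exact hitB it hit
          refine ⟨it.2 + pvDist.getD (it.1.2, np) 0, ?_, ?_⟩
          · rw [pvMem_candsA]
            refine ⟨((it.1.2, p), it.2), (memA _ _).mp hgA, fun hc => ho'p (show it.1.2 = p from hc), ?_⟩
            exact Or.inl ⟨by rw [hop], rfl⟩
          · rw [hyv, pvDist_getD ho'C hnp]
    · apply pvBlend_congr
      · intro x hx
        rw [pvMem_candsA] at hx
        obtain ⟨it, hit, hlr, hcase⟩ := hx
        obtain ⟨hsh, hlC, hrC⟩ := hShA _ hit
        rcases hcase with ⟨hk, hxv⟩ | ⟨hk, hxv⟩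
        · -- key (np, it.1.2) = (o, np) forces o = np, impossible
          exact absurd (Prod.ext_iff.mp hk).1 honp
        · -- the right hand moved onto np; key (it.1.1, np), so it.1.1 = o
          have hor : o = it.1.1 := (Prod.ext_iff.mp hk).1
          by_cases hop : o = p
          · -- o = p : the A-item (p, it.1.2) matches the B-state (true, it.1.2)
            have h1p : it.1.1 = p := hor.symm.trans hop
            have hr2 : it.1.2 ≠ p := fun hc => hlr (h1p.trans hc.symm)
            have hkey : it.1 = (p, it.1.2) := Prod.ext_iff.mpr ⟨h1p, rfl⟩
            have hgB : dpB.get? (true, it.1.2) = some it.2 := by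
              rw [← (hEq it.1.2 hrC hr2).1, ← hkey]
              exact hitA it hit
            refine ⟨it.2 + pvD it.1.2 np, ?_, ?_⟩
            · rw [pvMem_candsB]
              refine ⟨((true, it.1.2), it.2), (memB _ _).mp hgB, Or.inr ⟨?_, ?_, rfl⟩⟩
              · rw [← hop]; exact honp
              · rw [hop]; rfl
            · rw [hxv, pvDist_getD hrC hnp]
          · -- o ≠ p : the second component must be p
            have hrp : it.1.2 = p := by
              rcases hsh with h1 | h1
              · exact absurd (hor.trans h1) hop
              · exact h1
            have hkey : it.1 = (o, p) := Prod.ext_iff.mpr ⟨hor.symm, hrp⟩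
            have hgB : dpB.get? (false, o) = some it.2 := by
              rw [← (hEq o ho hop).2, ← hkey]
              exact hitA it hit
            refine ⟨it.2 + pvD p np, ?_, ?_⟩
            · rw [pvMem_candsB]
              exact ⟨((false, o), it.2), (memB _ _).mp hgB, Or.inl ⟨honp, rfl, rfl⟩⟩
            · rw [hxv, hrp, pvDist_getD hp hnp]
      · intro y hy
        rw [pvMem_candsB] at hy
        obtain ⟨it, hit, hcase⟩ := hy
        obtain ⟨ho'C, ho'p⟩ := hShB _ hit
        rcases hcase with ⟨ho'np, hk, hyv⟩ | ⟨hpnp, hk, hyv⟩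
        · -- active move: it.1 = (false, o)
          have hkey : it.1 = (false, o) := hk.symm
          have hop : o ≠ p := by rw [← (show it.1.2 = o from congrArg Prod.snd hkey)]; exact ho'p
          have hgA : dpA.get? (o, p) = some it.2 := by
            rw [(hEq o ho hop).2, ← hkey]
            exact hitB it hit
          refine ⟨it.2 + pvDist.getD (p, np) 0, ?_, ?_⟩
          · rw [pvMem_candsA]
            exact ⟨((o, p), it.2), (memA _ _).mp hgA, fun hc => hop (show o = p from hc),
              Or.inr ⟨rfl, rfl⟩⟩
          · rw [hyv, pvDist_getD hp hnp]
        · -- idle move: key (false, o) = (!it.1.1, p), so o = p and it.1.1 = true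
          have hop : o = p := (Prod.ext_iff.mp hk).2
          have hs : it.1.1 = true := by
            have hb := (Prod.ext_iff.mp hk).1
            cases hbc : it.1.1
            · rw [hbc] at hb; simp at hb
            · rfl
          have hkey : it.1 = (true, it.1.2) := Prod.ext_iff.mpr ⟨hs, rfl⟩
          have hgA : dpA.get? (p, it.1.2) = some it.2 := by
            rw [(hEq it.1.2 ho'C ho'p).1, ← hkey]
            exact hitB it hit
          refine ⟨it.2 + pvDist.getD (it.1.2, np) 0, ?_, ?_⟩
          · rw [pvMem_candsA]
            refine ⟨((p, it.1.2), it.2), (memA _ _).mp hgA, fun hc => ho'p (show p = it.1.2 from hc).symm, ?_⟩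
            exact Or.inr ⟨by rw [hop], rfl⟩
          · rw [hyv, pvDist_getD ho'C hnp]
  have hndA' := pvStepA_nodup np dpA
  have hndB' := pvStepB_nodup p np dpB
  have memA' : ∀ (k : (Int × Int) × (Int × Int)) (v : Int),
      (pvStepA np dpA).get? k = some v ↔ (k, v) ∈ (pvStepA np dpA).items :=
    fun k v => PySem.Dict.get?_eq_some_iff_mem_items _ k v hndA'
  have memB' : ∀ (k : Bool × (Int × Int)) (v : Int),
      (pvStepB p np dpB).get? k = some v ↔ (k, v) ∈ (pvStepB p np dpB).items :=
    fun k v => PySem.Dict.get?_eq_some_iff_mem_items _ k v hndB'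
  refine ⟨hndA', hndB', ?_, ?_, ?_, ?_, ?_⟩
  · -- get? correspondence
    intro o ho honp
    rw [pvStepA_get?, pvStepA_get?, pvStepB_get?, pvStepB_get?]
    exact main o ho honp
  · -- A key shapes
    intro it hit
    have hg : (pvStepA np dpA).get? it.1 = some it.2 := (memA' it.1 it.2).mpr (by rwa [Prod.mk.eta])
    rw [pvStepA_get?] at hg
    have hm := pvBlend_mem hg
    rw [pvMem_candsA] at hm
    obtain ⟨it', hit', hlr, hcase⟩ := hm
    obtain ⟨_, hlC, hrC⟩ := hShA _ hit'
    rcases hcase with ⟨hk, _⟩ | ⟨hk, _⟩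
    · rw [hk]; exact ⟨Or.inl rfl, hnpC, hrC⟩
    · rw [hk]; exact ⟨Or.inr rfl, hlC, hnpC⟩
  · -- B key shapes
    intro it hit
    have hg : (pvStepB p np dpB).get? it.1 = some it.2 := (memB' it.1 it.2).mpr (by rwa [Prod.mk.eta])
    rw [pvStepB_get?] at hg
    have hm := pvBlend_mem hg
    rw [pvMem_candsB] at hm
    obtain ⟨it', hit', hcase⟩ := hm
    obtain ⟨ho'C, _⟩ := hShB _ hit'
    rcases hcase with ⟨ho'np, hk, _⟩ | ⟨hpnp, hk, _⟩
    · rw [hk]; exact ⟨ho'C, ho'np⟩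
    · rw [hk]; exact ⟨hp, hpnp⟩
  · -- B stays nonempty
    have hne' : ∀ (k : Bool × (Int × Int)) (x : Int), x ∈ pvCandsB p np k dpB.items →
        (pvStepB p np dpB).items ≠ [] := by
      intro k x hx
      have hnn : (pvStepB p np dpB).get? k ≠ none := by
        rw [pvStepB_get?]
        intro hcon
        rw [pvBlend_none_eq_none_iff] at hcon
        rw [hcon] at hx
        cases hx
      rcases hg : (pvStepB p np dpB).get? k with _ | v
      · exact absurd hg hnn
      · exact List.ne_nil_of_mem ((memB' _ _).mp hg)
    obtain ⟨it0, hit0⟩ := List.exists_mem_of_ne_nil _ hNE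
    obtain ⟨hoC, hop⟩ := hShB _ hit0
    by_cases honp : it0.1.2 = np
    · have hpnp : p ≠ np := fun hc => hop (by rw [honp, ← hc])
      exact hne' (!it0.1.1, p) (it0.2 + pvD it0.1.2 np)
        (by rw [pvMem_candsB]; exact ⟨it0, hit0, Or.inr ⟨hpnp, rfl, rfl⟩⟩)
    · exact hne' it0.1 (it0.2 + pvD p np)
        (by rw [pvMem_candsB]; exact ⟨it0, hit0, Or.inl ⟨honp, rfl, rfl⟩⟩)
  · -- overlap state is dominated by some B state
    intro it hit hk
    have hg : (pvStepA np dpA).get? (np, np) = some it.2 := by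
      rw [← hk]; exact (memA' it.1 it.2).mpr (by rwa [Prod.mk.eta])
    rw [pvStepA_get?] at hg
    have hm := pvBlend_mem hg
    rw [pvMem_candsA] at hm
    obtain ⟨it', hit', hlr, hcase⟩ := hm
    obtain ⟨_, hlC, hrC⟩ := hShA _ hit'
    rcases hcase with ⟨hk', hxv⟩ | ⟨hk', hxv⟩
    · -- it'.1.2 = np : companion key (it'.1.1, np)
      have hrnp : np = it'.1.2 := show _ from (Prod.ext_iff.mp hk').2
      have hlnp : it'.1.1 ≠ np := fun hc => hlr (hc.trans hrnp)
      have hcomp : it'.2 + pvDist.getD (it'.1.2, np) 0 ∈ pvCandsA np (it'.1.1, np) dpA.items := by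
        rw [pvMem_candsA]
        exact ⟨it', hit', hlr, Or.inr ⟨rfl, rfl⟩⟩
      rcases hbl : pvBlend none (pvCandsA np (it'.1.1, np) dpA.items) with _ | w
      · rw [pvBlend_none_eq_none_iff] at hbl; rw [hbl] at hcomp; cases hcomp
      · have hw := pvBlend_le hbl _ hcomp
        have hBg : (pvStepB p np dpB).get? (false, it'.1.1) = some w := by
          rw [pvStepB_get?, ← (main it'.1.1 hlC hlnp).2, hbl]
        refine ⟨((false, it'.1.1), w), (memB' _ _).mp hBg, ?_⟩
        have h1 : pvDist.getD (it'.1.2, np) 0 = 1 := by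
          rw [pvDist_getD hrC hnp, ← hrnp]; exact pvD_self _
        have h2 : 1 ≤ pvD it'.1.1 np := pvD_ge_one _ _
        have h3 : it.2 = it'.2 + pvD it'.1.1 np := by rw [hxv, pvDist_getD hlC hnp]
        omega
    · -- it'.1.1 = np : companion key (np, it'.1.2)
      have hlnp : np = it'.1.1 := show _ from (Prod.ext_iff.mp hk').1
      have hrnp : it'.1.2 ≠ np := fun hc => hlr (hlnp.symm.trans hc.symm)
      have hcomp : it'.2 + pvDist.getD (it'.1.1, np) 0 ∈ pvCandsA np (np, it'.1.2) dpA.items := by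
        rw [pvMem_candsA]
        exact ⟨it', hit', hlr, Or.inl ⟨rfl, rfl⟩⟩
      rcases hbl : pvBlend none (pvCandsA np (np, it'.1.2) dpA.items) with _ | w
      · rw [pvBlend_none_eq_none_iff] at hbl; rw [hbl] at hcomp; cases hcomp
      · have hw := pvBlend_le hbl _ hcomp
        have hBg : (pvStepB p np dpB).get? (true, it'.1.2) = some w := by
          rw [pvStepB_get?, ← (main it'.1.2 hrC hrnp).1, hbl]
        refine ⟨((true, it'.1.2), w), (memB' _ _).mp hBg, ?_⟩
        have h1 : pvDist.getD (it'.1.1, np) 0 = 1 := by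
          rw [pvDist_getD hlC hnp, ← hlnp]; exact pvD_self _
        have h2 : 1 ≤ pvD it'.1.2 np := pvD_ge_one _ _
        have h3 : it.2 = it'.2 + pvD it'.1.2 np := by rw [hxv, pvDist_getD hrC hnp]
        omega

theorem pvValues_eq (dp : PySem.Dict ((Int × Int) × (Int × Int)) Int) :
    dp.values = dp.items.map (·.2) := rfl

theorem pvValuesB_eq (dp : PySem.Dict (Bool × (Int × Int)) Int) :
    dp.values = dp.items.map (·.2) := rfl

theorem pvInv_min (p : Int × Int) (dpA : PySem.Dict ((Int × Int) × (Int × Int)) Int)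
    (dpB : PySem.Dict (Bool × (Int × Int)) Int) (h : pvInv p dpA dpB) :
    (PySem.List.min? dpA.values (fun v => v)).getD 0 =
      (PySem.List.min? dpB.values (fun v => v)).getD 0 := by
  obtain ⟨hndA, hndB, hEq, hShA, hShB, hNE, hOv⟩ := h
  have memA : ∀ (k : (Int × Int) × (Int × Int)) (v : Int),
      dpA.get? k = some v ↔ (k, v) ∈ dpA.items :=
    fun k v => PySem.Dict.get?_eq_some_iff_mem_items dpA k v hndA
  have memB : ∀ (k : Bool × (Int × Int)) (v : Int),
      dpB.get? k = some v ↔ (k, v) ∈ dpB.items :=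
    fun k v => PySem.Dict.get?_eq_some_iff_mem_items dpB k v hndB
  rw [pvMin?_eq_blend, pvMin?_eq_blend, pvValues_eq, pvValuesB_eq]
  have hb : pvBlend none (dpA.items.map (·.2)) = pvBlend none (dpB.items.map (·.2)) := by
    apply pvBlend_congr
    · intro x hx
      rw [List.mem_map] at hx
      obtain ⟨⟨⟨l, r⟩, c⟩, hit, hc⟩ := hx
      simp only at hc
      subst hc
      obtain ⟨hsh, hlC, hrC⟩ := hShA _ hit
      simp only at hsh hlC hrC
      by_cases hov : l = p ∧ r = p
      · obtain ⟨it', hit', hle⟩ := hOv _ hit (by simp [hov.1, hov.2])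
        exact ⟨it'.2, List.mem_map.mpr ⟨it', hit', rfl⟩, hle⟩
      · rcases hsh with hlp | hrp
        · have hrp : r ≠ p := fun hc => hov ⟨hlp, hc⟩
          have hg : dpB.get? (true, r) = some c := by
            rw [← (hEq r hrC hrp).1, ← (show ((l, r) : (Int × Int) × (Int × Int)) = (p, r) from by rw [hlp])]
            exact (memA _ _).mpr hit
          exact ⟨c, List.mem_map.mpr ⟨((true, r), c), (memB _ _).mp hg, rfl⟩, le_refl _⟩
        · have hlp : l ≠ p := fun hc => hov ⟨hc, hrp⟩
          have hg : dpB.get? (false, l) = some c := by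
            rw [← (hEq l hlC hlp).2, ← (show ((l, r) : (Int × Int) × (Int × Int)) = (l, p) from by rw [hrp])]
            exact (memA _ _).mpr hit
          exact ⟨c, List.mem_map.mpr ⟨((false, l), c), (memB _ _).mp hg, rfl⟩, le_refl _⟩
    · intro y hy
      rw [List.mem_map] at hy
      obtain ⟨⟨⟨s, o⟩, c⟩, hit, hc⟩ := hy
      simp only at hc
      subst hc
      obtain ⟨hoC, hop⟩ := hShB _ hit
      simp only at hoC hop
      cases s
      · have hg : dpA.get? (o, p) = some c := by
          rw [(hEq o hoC hop).2]; exact (memB _ _).mpr hit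
        exact ⟨c, List.mem_map.mpr ⟨((o, p), c), (memA _ _).mp hg, rfl⟩, le_refl _⟩
      · have hg : dpA.get? (p, o) = some c := by
          rw [(hEq o hoC hop).1]; exact (memB _ _).mpr hit
        exact ⟨c, List.mem_map.mpr ⟨((p, o), c), (memA _ _).mp hg, rfl⟩, le_refl _⟩
  rw [hb]

theorem pvLoop (rest : List String) :
    ∀ (p : Int × Int) (dpA : PySem.Dict ((Int × Int) × (Int × Int)) Int)
      (dpB : PySem.Dict (Bool × (Int × Int)) Int),
      p ∈ pvDigits → pvInv p dpA dpB → (∀ s ∈ rest, s ∈ pvDigitKeys) →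
      ∃ q, q ∈ pvDigits ∧
        pvInv q (rest.foldl (fun dp num => pvStepA ((pvPos.get? num).getD (0, 0)) dp) dpA)
          ((rest.foldl
              (fun (st : (Int × Int) × PySem.Dict (Bool × (Int × Int)) Int) num =>
                (((pvPos.get? num).getD (0, 0)), pvStepB st.1 ((pvPos.get? num).getD (0, 0)) st.2))
              (p, dpB)).2) := by
  induction rest with
  | nil => intro p dpA dpB hp hinv _; exact ⟨p, hp, hinv⟩
  | cons num rest ih =>
    intro p dpA dpB hp hinv hd
    have hnum : num ∈ pvDigitKeys := hd num (List.mem_cons_self ..)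
    have hnp : ((pvPos.get? num).getD (0, 0)) ∈ pvDigits := pvPosLook_digits num hnum
    rw [List.foldl_cons, List.foldl_cons]
    exact ih ((pvPos.get? num).getD (0, 0)) _ _ hnp
      (pvInv_step p _ (pvDigits_sub_cells p hp) hnp dpA dpB hinv)
      (fun s hs => hd s (List.mem_cons_of_mem _ hs))

-- ===== VERDICT (by name: the statement is the Claim_ definition above) =====
theorem solution_spec : Claim_equal_solution := by
  intro numbers _ hPre
  unfold Spec_solution
  cases numbers with
  | nil => decide
  | cons n0 rest =>
    have hn0 : n0 ∈ pvDigitKeys := by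
      simpa [pvDigitKeys] using hPre n0 (List.mem_cons_self ..)
    have hrest : ∀ s ∈ rest, s ∈ pvDigitKeys := fun s hs => by
      simpa [pvDigitKeys] using hPre s (List.mem_cons_of_mem _ hs)
    have hnp0 : ((pvPos.get? n0).getD (0, 0)) ∈ pvDigits := pvPosLook_digits n0 hn0
    have hA : solution (n0 :: rest) =
        (PySem.List.min? ((rest.foldl (fun dp num => pvStepA ((pvPos.get? num).getD (0, 0)) dp)
          (pvStepA ((pvPos.get? n0).getD (0, 0)) pvDP0A)).values) (fun v => v)).getD 0 := rfl
    have hB : solution_alt (n0 :: rest) =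
        (PySem.List.min? (((rest.foldl
          (fun (st : (Int × Int) × PySem.Dict (Bool × (Int × Int)) Int) num =>
            (((pvPos.get? num).getD (0, 0)), pvStepB st.1 ((pvPos.get? num).getD (0, 0)) st.2))
          (((pvPos.get? n0).getD (0, 0)), pvSeedB ((pvPos.get? n0).getD (0, 0))))).2.values)
          (fun v => v)).getD 0 := rfl
    rw [hA, hB]
    obtain ⟨q, hq, hinv⟩ := pvLoop rest _ _ _ hnp0 (pvInv_base _ hnp0) hrest
    exact pvInv_min q _ _ hinv
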